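-- pv_equiv track=rewrite | github.com/bus94/Study | Daily_Challenge/day8.py | solution
-- ===== SOURCE A (Python) =====
-- def solution(a, b, c, d):
--     result = 0
--     numList = [a, b, c, d]
--     setList = set(numList)
--     if len(setList) == 1:
--         result += 1111 * a
--     elif len(setList) == 2:
--         for i in numList:
--             x = list(setList - {i})[0]
--             if numList.count(i) == 1:
--                 result += (10 * x + i) ** 2
--                 break
--             elif numList.count(i) == 2:
--                 result += (x + i) * abs(x - i)
--                 break
--     elif len(setList) == 3:
--         for i in numList:
--             y = list(setList - {i})
--             if numList.count(i) == 2: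
--                 result += y[0] * y[1]
--                 break
--     elif len(setList) == 4:
--         result += min(setList)
--     return result
-- ===== SOURCE B (Python) =====
-- def solution(a, b, c, d):
--     # Arithmetic approach: count equal unordered pairs e among the 6 pairs,
--     # then compute each case from min, max and power sums (no multiset/count dispatch).
--     e = (a == b) + (a == c) + (a == d) + (b == c) + (b == d) + (c == d)
--     lo = min(a, b, c, d)
--     hi = max(a, b, c, d)
--     T = a + b + c + d
--     if e == 6:                       # all four equal
--         return 1111 * a
--     if e == 3:                       # three of a kind: T = 3*triple + single
--         s = hi if T == 3 * lo + hi else lo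
--         t = lo + hi - s
--         return (10 * t + s) ** 2
--     if e == 2:                       # two pairs: (u+v)*|u-v| = hi^2 - lo^2
--         return hi * hi - lo * lo
--     if e == 1:                       # one pair p, two singles s1,s2: s1*s2 from power sums
--         p = a if a in (b, c, d) else b if b in (c, d) else c
--         Q = a * a + b * b + c * c + d * d
--         return ((T - 2 * p) ** 2 - (Q - 2 * p * p)) // 2
--     return lo                        # all distinct
-- ===== Notes on version B (the rewrite author's own statement) =====
-- stated objective: alternative
-- what changed: B replaces A's len(set) dispatch with for/break list.count loops by pure arithmetic: it counts equal unordered pairs (6/3/2/1/0) and derives each result from min, max and power sums (hi^2-lo^2 for two pairs, the singles' product from sum and sum-of-squares for one pair), never materialising a set or selecting values by multiplicity loops.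
import Mathlib
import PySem

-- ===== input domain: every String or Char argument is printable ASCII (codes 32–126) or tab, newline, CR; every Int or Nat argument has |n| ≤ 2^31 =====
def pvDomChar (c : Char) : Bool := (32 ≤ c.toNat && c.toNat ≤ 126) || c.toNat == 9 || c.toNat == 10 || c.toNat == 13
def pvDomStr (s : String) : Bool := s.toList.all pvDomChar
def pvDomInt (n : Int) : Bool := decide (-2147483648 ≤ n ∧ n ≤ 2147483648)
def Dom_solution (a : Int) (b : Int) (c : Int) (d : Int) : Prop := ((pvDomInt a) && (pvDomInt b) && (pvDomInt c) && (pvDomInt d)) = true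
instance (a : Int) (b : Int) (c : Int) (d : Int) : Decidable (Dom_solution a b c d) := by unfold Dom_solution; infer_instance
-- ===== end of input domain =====

-- B replaces A's len(set) dispatch with for/break list.count loops by pure arithmetic on the
-- four values: it counts equal unordered pairs and derives each case's result from min, max
-- and power sums (objective: alternative).

-- ===== PORT A =====
-- 'for i in numList: … break'  of A's  len(setList) == 2  branch
def solLoop2 (numList : List Int) (setList : PySem.Set Int) : List Int → Int
  | [] => 0
  | i :: rest =>
    let x := PySem.List.pyGetD (PySem.Set.diff setList (PySem.Set.ofList [i])) 0 0
    if numList.count i == 1 then (10 * x + i) ^ 2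
    else if numList.count i == 2 then (x + i) * |x - i|
    else solLoop2 numList setList rest

-- 'for i in numList: … break'  of A's  len(setList) == 3  branch
def solLoop3 (numList : List Int) (setList : PySem.Set Int) : List Int → Int
  | [] => 0
  | i :: rest =>
    let y := PySem.Set.diff setList (PySem.Set.ofList [i])
    if numList.count i == 2 then PySem.List.pyGetD y 0 0 * PySem.List.pyGetD y 1 0
    else solLoop3 numList setList rest

def solution (a : Int) (b : Int) (c : Int) (d : Int) : Int :=
  let numList : List Int := [a, b, c, d]
  let setList : PySem.Set Int := PySem.Set.ofList numList
  if PySem.Set.len setList == 1 then 0 + 1111 * a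
  else if PySem.Set.len setList == 2 then 0 + solLoop2 numList setList numList
  else if PySem.Set.len setList == 3 then 0 + solLoop3 numList setList numList
  else if PySem.Set.len setList == 4 then
    0 + (PySem.List.min? setList (fun x => x)).getD 0
  else 0

-- ===== PORT B =====
def solution_alt (a : Int) (b : Int) (c : Int) (d : Int) : Int :=
  let e : Int := (if a == b then 1 else 0) + (if a == c then 1 else 0) + (if a == d then 1 else 0)
      + (if b == c then 1 else 0) + (if b == d then 1 else 0) + (if c == d then 1 else 0)
  let lo := (PySem.List.min? [a, b, c, d] (fun x => x)).getD 0
  let hi := (PySem.List.max? [a, b, c, d] (fun x => x)).getD 0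
  let T := a + b + c + d
  if e == 6 then 1111 * a
  else if e == 3 then
    let s := if T == 3 * lo + hi then hi else lo
    let t := lo + hi - s
    (10 * t + s) ^ 2
  else if e == 2 then hi * hi - lo * lo
  else if e == 1 then
    let p := if a == b || a == c || a == d then a else if b == c || b == d then b else c
    let q := a * a + b * b + c * c + d * d
    PySem.Int.floordiv ((T - 2 * p) ^ 2 - (q - 2 * p * p)) 2
  else lo

-- ===== PRECONDITION & SPEC =====
def Spec_solution (a : Int) (b : Int) (c : Int) (d : Int) (out : Int) : Prop := out = solution_alt a b c d
instance (a : Int) (b : Int) (c : Int) (d : Int) (out : Int) : Decidable (Spec_solution a b c d out) := by unfold Spec_solution; infer_instance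

-- ===== CLAIM (what is proved, stated in full; the proofs are below) =====
def Claim_equal_solution : Prop := ∀ (a : Int) (b : Int) (c : Int) (d : Int), Dom_solution a b c d → Spec_solution a b c d (solution a b c d)

-- ===== LEMMAS AND PROOFS =====
theorem pvFdivTwo (x y : Int) (h : x = 2 * y) : x.fdiv 2 = y := by
  subst h; rw [Int.mul_fdiv_cancel_left _ (by norm_num)]

-- ===== VERDICT (by name: the statement is the Claim_ definition above) =====
set_option maxHeartbeats 4000000 in
theorem solution_spec : Claim_equal_solution := by
  intro a b c d _
  unfold Spec_solution
  by_cases h1 : a = b <;> by_cases h2 : a = c <;> by_cases h3 : b = c <;>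
    by_cases h4 : a = d <;> by_cases h5 : b = d <;> by_cases h6 : c = d <;>
    subst_vars <;>
    (try have h1' : _ ≠ _ := Ne.symm h1) <;> (try have h2' : _ ≠ _ := Ne.symm h2) <;>
    (try have h3' : _ ≠ _ := Ne.symm h3) <;> (try have h4' : _ ≠ _ := Ne.symm h4) <;>
    (try have h5' : _ ≠ _ := Ne.symm h5) <;> (try have h6' : _ ≠ _ := Ne.symm h6) <;>
    simp_all [solution, solution_alt, solLoop2, solLoop3,
      PySem.Set.ofList, PySem.Set.add, PySem.Set.contains, PySem.Set.diff, PySem.Set.len,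
      PySem.List.pyGetD, PySem.List.min?_id_cons, PySem.List.max?_id_cons,
      List.foldl, Option.getD_some, PySem.Int.floordiv, min_def, max_def] <;>
    (try simp only [abs_eq_max_neg, max_def]) <;> (repeat' split) <;>
    (try simp_all) <;>
    first
      | rfl
      | omega
      | (exfalso; omega)
      | ring
      | skip
  all_goals (symm; apply pvFdivTwo; ring)
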